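-- pv_equiv track=rewrite | github.com/AjCodez/Leetcode | Print Diagonally - GFG/print-diagonally.py | downwardDigonal
-- ===== SOURCE A (Python) =====
-- def downwardDigonal(N, A):
--     # code here
--     l=[]
--     for i in range(N):
--         j=i
--         k=0
--         while j>=0 and i<N:
--             l.append(A[k][j])
--             k+=1
--             j-=1
--     for i in range(1,N):
--         j=N-1
--         k=i
--         while k<=N-1 and j>-1:
--             l.append(A[k][j])
--             k+=1
--             j-=1
--     return l
-- ===== SOURCE B (Python) =====
-- def downwardDigonal(N, A):
--     buckets = [[] for _ in range(2 * N - 1)]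
--     for r in range(N):
--         for c in range(N):
--             buckets[r + c].append(A[r][c])
--     out = []
--     for b in buckets:
--         out.extend(b)
--     return out
-- ===== Notes on version B (the rewrite author's own statement) =====
-- stated objective: alternative
-- what changed: Replaces A's two per-diagonal while-loop walks (down-left from the top row, then from the right column) with a single row-major pass that appends each element to a bucket indexed by r+c and then concatenates the buckets.
import Mathlib
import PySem

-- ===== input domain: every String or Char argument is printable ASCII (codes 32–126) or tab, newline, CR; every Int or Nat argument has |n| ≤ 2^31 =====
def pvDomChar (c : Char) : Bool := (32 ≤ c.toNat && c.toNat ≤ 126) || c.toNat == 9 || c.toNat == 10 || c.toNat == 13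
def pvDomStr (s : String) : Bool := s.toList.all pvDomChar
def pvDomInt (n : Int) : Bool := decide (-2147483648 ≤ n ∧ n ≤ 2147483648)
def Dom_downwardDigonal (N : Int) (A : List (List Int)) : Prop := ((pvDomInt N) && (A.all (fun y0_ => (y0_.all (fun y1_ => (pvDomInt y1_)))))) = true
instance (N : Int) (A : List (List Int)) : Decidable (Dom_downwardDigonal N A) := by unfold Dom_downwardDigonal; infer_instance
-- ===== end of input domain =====

-- B replaces A's two families of per-diagonal while-loop walks with a single
-- row-major pass that drops each element into a bucket indexed by r+c and
-- concatenates the buckets (alternative decomposition, same cost).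

-- ===== PORT A =====
-- first while loop: 'while j>=0 and i<N: l.append(A[k][j]); k+=1; j-=1'
def pvWhile1 (N : Int) (A : List (List Int)) (i j k : Int) : List Int :=
  if j ≥ 0 ∧ i < N then
    PySem.List.pyGetD (PySem.List.pyGetD A k []) j 0 :: pvWhile1 N A i (j - 1) (k + 1)
  else []
termination_by (j + 1).toNat
decreasing_by omega

-- second while loop: 'while k<=N-1 and j>-1: l.append(A[k][j]); k+=1; j-=1'
def pvWhile2 (N : Int) (A : List (List Int)) (j k : Int) : List Int :=
  if k ≤ N - 1 ∧ j > -1 then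
    PySem.List.pyGetD (PySem.List.pyGetD A k []) j 0 :: pvWhile2 N A (j - 1) (k + 1)
  else []
termination_by (j + 1).toNat
decreasing_by omega

def downwardDigonal (N : Int) (A : List (List Int)) : List Int :=
  (PySem.List.pyRange 1 N 1).foldl (fun l i => l ++ pvWhile2 N A (N - 1) i)
    ((PySem.List.pyRange 0 N 1).foldl (fun l i => l ++ pvWhile1 N A i i 0) [])

-- ===== PORT B =====
-- buckets[r+c].append(A[r][c]) in row-major order, then concatenate the buckets
def downwardDigonal_alt (N : Int) (A : List (List Int)) : List Int :=
  ((PySem.List.pyRange 0 N 1).foldl (fun bs r =>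
    (PySem.List.pyRange 0 N 1).foldl (fun bs c =>
      bs.set (r + c).toNat
        (bs.getD (r + c).toNat [] ++ [PySem.List.pyGetD (PySem.List.pyGetD A r []) c 0])) bs)
    ((PySem.List.pyRange 0 (2 * N - 1) 1).map (fun _ => []))).foldl
    (fun out b => out ++ b) []

-- ===== PRECONDITION & SPEC =====
-- Pre_: A needs at least N rows, each of the first N rows with at least N entries;
-- on any other input Python A raises IndexError (it reads every A[k][j] with 0 ≤ k,j < N).
def Pre_downwardDigonal (N : Int) (A : List (List Int)) : Prop :=
  N ≤ (A.length : Int) ∧ ∀ row ∈ A.take N.toNat, N ≤ (row.length : Int)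
instance (N : Int) (A : List (List Int)) : Decidable (Pre_downwardDigonal N A) := by
  unfold Pre_downwardDigonal; infer_instance

def pvWitness_downwardDigonal : Int × List (List Int) := (2, [[1, 2], [3, 4]])

def Spec_downwardDigonal (N : Int) (A : List (List Int)) (out : List Int) : Prop := out = downwardDigonal_alt N A
instance (N : Int) (A : List (List Int)) (out : List Int) : Decidable (Spec_downwardDigonal N A out) := by unfold Spec_downwardDigonal; infer_instance

-- ===== CLAIM (what is proved, stated in full; the proofs are below) =====
def Claim_equal_downwardDigonal : Prop := ∀ (N : Int) (A : List (List Int)), Dom_downwardDigonal N A → Pre_downwardDigonal N A → Spec_downwardDigonal N A (downwardDigonal N A)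

-- ===== LEMMAS AND PROOFS =====

-- total element access A[r][c] as both ports perform it
def pvG (A : List (List Int)) (r c : Int) : Int :=
  PySem.List.pyGetD (PySem.List.pyGetD A r []) c 0

-- anti-diagonal s of the N×N grid, restricted to rows < R
def pvDiagUpto (A : List (List Int)) (n R s : Nat) : List Int :=
  ((List.range R).filter (fun k => decide (k ≤ s ∧ s < k + n))).map
    (fun (k : Nat) => pvG A ((k : Nat) : Int) ((s : Int) - ((k : Nat) : Int)))

theorem pvWhile1_eq (N : Int) (A : List (List Int)) (i : Int) (hi : i < N) :
    ∀ (n : Nat) (k : Int),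
      pvWhile1 N A i (n : Int) k
        = (List.range (n + 1)).map (fun (t : Nat) => pvG A (k + (t : Int)) ((n : Int) - (t : Int))) := by
  intro n
  induction n with
  | zero =>
    intro k
    rw [pvWhile1, pvWhile1]
    simp [hi, pvG]
  | succ n ih =>
    intro k
    rw [pvWhile1]
    have h1 : ((n + 1 : Nat) : Int) - 1 = (n : Int) := by push_cast; ring
    rw [if_pos ⟨by positivity, hi⟩, h1, ih]
    conv_rhs => rw [List.range_succ_eq_map]
    rw [List.map_cons, List.map_map]
    congr 1
    · simp [pvG]
    · apply List.map_congr_left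
      intro t ht
      simp only [Function.comp_apply, Nat.succ_eq_add_one]
      congr 1 <;> push_cast <;> ring

theorem pvWhile2_eq (N : Int) (A : List (List Int)) :
    ∀ (m : Nat) (j k : Int), (m : Int) = min (N - k) (j + 1) →
      pvWhile2 N A j k
        = (List.range m).map (fun (t : Nat) => pvG A (k + (t : Int)) (j - (t : Int))) := by
  intro m
  induction m with
  | zero =>
    intro j k hm
    rw [pvWhile2]
    rw [if_neg (by omega)]
    simp
  | succ m ih =>
    intro j k hm
    rw [pvWhile2, if_pos (by omega)]
    rw [ih (j - 1) (k + 1) (by omega)]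
    conv_rhs => rw [List.range_succ_eq_map]
    rw [List.map_cons, List.map_map]
    congr 1
    · simp [pvG]
    · apply List.map_congr_left
      intro t ht
      simp only [Function.comp_apply, Nat.succ_eq_add_one]
      congr 1 <;> push_cast <;> ring

theorem pv_filter_range_le : ∀ (n s : Nat),
    (List.range n).filter (fun k => decide (k ≤ s)) = List.range (min (s + 1) n) := by
  intro n s
  induction n with
  | zero => simp
  | succ n ih =>
    rw [List.range_succ, List.filter_append, ih]
    by_cases h : n ≤ s
    · have : min (s+1) (n+1) = min (s+1) n + 1 := by omega
      rw [this, List.range_succ]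
      simp [h]
      omega
    · have : min (s+1) (n+1) = min (s+1) n := by omega
      rw [this]
      simp [h]

theorem pv_filter_range_gt : ∀ (n i : Nat),
    (List.range n).filter (fun k => decide (i < k))
      = (List.range (n - (i + 1))).map (fun t => i + 1 + t) := by
  intro n i
  induction n with
  | zero => simp
  | succ n ih =>
    rw [List.range_succ, List.filter_append, ih]
    by_cases h : i < n
    · have h2 : n + 1 - (i+1) = (n - (i+1)) + 1 := by omega
      rw [h2, List.range_succ]
      simp [h]
    · have h2 : n + 1 - (i+1) = n - (i+1) := by omega
      rw [h2]
      simp [h]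

theorem pv_map_range_getD (bs : List (List Int)) :
    (List.range bs.length).map (fun s => bs.getD s []) = bs := by
  apply List.ext_getElem
  · simp
  · intro i h1 h2
    simp [List.getD_eq_getElem?_getD, List.getElem?_eq_getElem h2]

theorem pv_getD_map_range {α : Type} [Inhabited α] (f : Nat → α) (m s : Nat) (h : s < m) (d : α) :
    ((List.range m).map f).getD s d = f s := by
  rw [List.getD_eq_getElem?_getD]
  simp [h]

theorem pvDiag_low (A : List (List Int)) (n s : Nat) (h : s < n) :
    pvDiagUpto A n n s
      = (List.range (s + 1)).map (fun (k : Nat) => pvG A (k : Int) ((s : Int) - (k : Int))) := by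
  unfold pvDiagUpto
  rw [List.filter_congr (q := fun k => decide (k ≤ s))
      (by intro k hk; simp only [decide_eq_decide]; simp only [List.mem_range] at hk; omega)]
  rw [pv_filter_range_le]
  have : min (s + 1) n = s + 1 := by omega
  rw [this]

theorem pvDiag_high (A : List (List Int)) (n i : Nat) :
    pvDiagUpto A n n (n + i)
      = (List.range (n - 1 - i)).map
          (fun (t : Nat) => pvG A ((i + 1 + t : Nat) : Int) (((n + i : Nat) : Int) - ((i + 1 + t : Nat) : Int))) := by
  unfold pvDiagUpto
  rw [List.filter_congr (q := fun k => decide (i < k))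
      (by intro k hk; simp only [decide_eq_decide]; simp only [List.mem_range] at hk; omega)]
  rw [pv_filter_range_gt]
  have : n - (i + 1) = n - 1 - i := by omega
  rw [this, List.map_map]
  rfl

theorem portA_eq (A : List (List Int)) (n : Nat) (hn : 1 ≤ n) :
    downwardDigonal ((n : Int)) A = (List.range (2*n-1)).flatMap (fun s => pvDiagUpto A n n s) := by
  unfold downwardDigonal
  rw [PySem.List.foldl_append_eq_flatMap, PySem.List.foldl_append_eq_flatMap]
  conv_rhs => rw [show 2*n-1 = n + (n-1) by omega, List.range_add, List.flatMap_append]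
  rw [List.nil_append]
  congr 1
  · rw [PySem.List.pyRange_one]
    have h0 : ((n : Int) - 0).toNat = n := by omega
    rw [h0]
    rw [List.flatMap_def, List.flatMap_def, List.map_map, List.map_congr_left]
    intro s hs
    simp only [List.mem_range] at hs
    simp only [Function.comp_apply, zero_add]
    rw [pvWhile1_eq (N := (n : Int)) A (↑s) (by exact_mod_cast hs) s 0]
    rw [pvDiag_low A n s hs]
    apply List.map_congr_left
    intro t ht
    simp
  · rw [PySem.List.pyRange_one]
    have h0 : ((n : Int) - 1).toNat = n - 1 := by omega
    rw [h0]
    rw [List.flatMap_def, List.flatMap_def, List.map_map, List.map_map, List.map_congr_left]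
    intro i hi
    simp only [List.mem_range] at hi
    simp only [Function.comp_apply]
    rw [pvWhile2_eq ((n:Int)) A (n - 1 - i) ((n:Int) - 1) (1 + (i:Int)) (by omega)]
    rw [pvDiag_high A n i]
    apply List.map_congr_left
    intro t ht
    simp only [List.mem_range] at ht
    congr 1 <;> omega

theorem pvInner (A : List (List Int)) (n r : Nat) (hr : r < n) :
    ∀ (C : Nat) (bs : List (List Int)), C ≤ n → bs.length = 2*n-1 →
    ((List.range C).map (fun (c : Nat) => (c : Int))).foldl
      (fun bs c => bs.set (((r : Int) + c)).toNat
        (bs.getD (((r : Int) + c)).toNat [] ++ [pvG A (r : Int) c])) bs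
    = (List.range (2*n-1)).map
        (fun s => if r ≤ s ∧ s < r + C
          then bs.getD s [] ++ [pvG A (r : Int) ((s : Int) - (r : Int))]
          else bs.getD s []) := by
  intro C
  induction C with
  | zero =>
    intro bs _ hlen
    simp only [List.range_zero, List.map_nil, List.foldl_nil]
    conv_lhs => rw [← pv_map_range_getD bs, hlen]
    apply List.map_congr_left
    intro s hs
    simp only [List.mem_range] at hs
    rw [if_neg (by omega)]
  | succ C ih =>
    intro bs hC hlen
    rw [List.range_succ, List.map_append, List.foldl_append]
    rw [ih bs (by omega) hlen]
    simp only [List.map_cons, List.map_nil, List.foldl_cons, List.foldl_nil]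
    have hidx : (((r : Int)) + (C : Int)).toNat = r + C := by omega
    have hrC : r + C < 2*n-1 := by omega
    rw [hidx]
    have hget : ((List.range (2*n-1)).map
        (fun s => if r ≤ s ∧ s < r + C
          then bs.getD s [] ++ [pvG A (r : Int) ((s : Int) - (r : Int))]
          else bs.getD s [])).getD (r + C) [] = bs.getD (r + C) [] := by
      rw [pv_getD_map_range _ _ _ hrC]
      rw [if_neg (by omega)]
    rw [hget]
    apply List.ext_getElem
    · simp
    · intro s h1 h2
      simp only [List.length_set, List.length_map, List.length_range] at h1
      rw [List.getElem_set]
      simp only [List.getElem_map, List.getElem_range]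
      by_cases hs : r + C = s
      · rw [if_pos hs, if_pos (by omega)]
        subst hs
        have hce : (((r + C : Nat)) : Int) - (r : Int) = (C : Int) := by push_cast; ring
        rw [hce]
      · rw [if_neg hs]
        by_cases hc : r ≤ s ∧ s < r + C
        · rw [if_pos hc, if_pos (by omega)]
        · rw [if_neg hc, if_neg (by omega)]

theorem pvOuter (A : List (List Int)) (n : Nat) (hn : 1 ≤ n) :
    ∀ (R : Nat), R ≤ n →
    ((List.range R).map (fun (r : Nat) => (r : Int))).foldl
      (fun bs r =>
        (PySem.List.pyRange 0 (n : Int) 1).foldl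
          (fun bs c => bs.set (r + c).toNat
            (bs.getD (r + c).toNat [] ++ [PySem.List.pyGetD (PySem.List.pyGetD A r []) c 0])) bs)
      ((List.range (2*n-1)).map (fun _ => ([] : List Int)))
    = (List.range (2*n-1)).map (fun s => pvDiagUpto A n R s) := by
  intro R
  induction R with
  | zero =>
    intro _
    simp only [List.range_zero, List.map_nil, List.foldl_nil]
    apply List.map_congr_left
    intro s _
    simp [pvDiagUpto]
  | succ R ih =>
    intro hR
    rw [List.range_succ, List.map_append, List.foldl_append]
    rw [ih (by omega)]
    simp only [List.map_cons, List.map_nil, List.foldl_cons, List.foldl_nil]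
    have hpr : PySem.List.pyRange 0 (n : Int) 1
        = (List.range n).map (fun (c : Nat) => (c : Int)) := by
      rw [PySem.List.pyRange_one]
      have : ((n : Int) - 0).toNat = n := by omega
      rw [this]
      apply List.map_congr_left
      intro c _
      simp
    rw [hpr]
    have := pvInner A n R (by omega) n ((List.range (2*n-1)).map (fun s => pvDiagUpto A n R s))
      (le_refl n) (by simp)
    simp only [pvG] at this
    rw [this]
    apply List.map_congr_left
    intro s hs
    simp only [List.mem_range] at hs
    have hget : ((List.range (2*n-1)).map (fun s => pvDiagUpto A n R s)).getD s []
        = pvDiagUpto A n R s := pv_getD_map_range _ _ _ hs _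
    have hsplit : pvDiagUpto A n (R+1) s
        = pvDiagUpto A n R s
          ++ (if R ≤ s ∧ s < R + n then [pvG A (R : Int) ((s : Int) - (R : Int))] else []) := by
      unfold pvDiagUpto
      rw [List.range_succ, List.filter_append, List.map_append]
      congr 1
      by_cases hc : R ≤ s ∧ s < R + n
      · rw [if_pos hc]
        simp only [List.filter_cons, List.filter_nil]
        rw [if_pos (by simpa using (by omega : R ≤ s ∧ s < R + n))]
        simp
      · rw [if_neg hc]
        simp only [List.filter_cons, List.filter_nil]
        rw [if_neg (by simpa using (by omega : ¬(R ≤ s ∧ s < R + n)))]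
        simp
    by_cases hc : R ≤ s ∧ s < R + n
    · rw [if_pos hc, hget, hsplit, if_pos hc]
      rfl
    · rw [if_neg hc, hget, hsplit, if_neg hc, List.append_nil]

theorem portB_eq (A : List (List Int)) (n : Nat) (hn : 1 ≤ n) :
    downwardDigonal_alt ((n : Int)) A = (List.range (2*n-1)).flatMap (fun s => pvDiagUpto A n n s) := by
  unfold downwardDigonal_alt
  have hb0 : (PySem.List.pyRange 0 (2 * (n : Int) - 1) 1).map (fun _ => ([] : List Int))
      = (List.range (2*n-1)).map (fun _ => ([] : List Int)) := by
    rw [PySem.List.pyRange_one]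
    have : ((2 * (n : Int) - 1) - 0).toNat = 2*n-1 := by omega
    rw [this, List.map_map]
    rfl
  have hpr : PySem.List.pyRange 0 (n : Int) 1
      = (List.range n).map (fun (c : Nat) => (c : Int)) := by
    rw [PySem.List.pyRange_one]
    have : ((n : Int) - 0).toNat = n := by omega
    rw [this]
    apply List.map_congr_left
    intro c _
    simp
  rw [hb0, hpr]
  have hout := pvOuter A n hn n (le_refl n)
  rw [hpr] at hout
  rw [hout]
  rw [PySem.List.foldl_append_eq_flatten, List.nil_append, List.flatMap_def]

-- ===== VERDICT (by name: the statement is the Claim_ definition above) =====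
theorem downwardDigonal_spec : Claim_equal_downwardDigonal := by
  intro N A _ _
  unfold Spec_downwardDigonal
  by_cases hN : N ≤ 0
  · have e1 : PySem.List.pyRange 0 N 1 = [] := PySem.List.pyRange_one_eq_nil (by omega)
    have e2 : PySem.List.pyRange 1 N 1 = [] := PySem.List.pyRange_one_eq_nil (by omega)
    have e3 : PySem.List.pyRange 0 (2 * N - 1) 1 = [] := PySem.List.pyRange_one_eq_nil (by omega)
    simp [downwardDigonal, downwardDigonal_alt, e1, e2, e3]
  · have hN' : N = ((N.toNat : Nat) : Int) := by omega
    have hn : 1 ≤ N.toNat := by omega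
    rw [hN', portA_eq A N.toNat hn, portB_eq A N.toNat hn]
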